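-- pv_equiv track=rewrite | github.com/n-luca13/Esami | Programmazione Avanzata - Python/main-old.py | find_pattern_from_input_matrix
-- ===== SOURCE A (Python) =====
-- def find_pattern_from_input_matrix(input_matrix):
--     """ Estrapolazione di un pattern dall'input dell'utente """
--     result_pattern = []
--     for row in input_matrix:
--         row_pattern = []
--         row_pattern = find_pattern_from_list(row, row_pattern)
--         # Ignoro le liste del tipo [0,0,0,0,0] all'inizio
--         if result_pattern or len(row_pattern) != 1:
--             result_pattern.append(row_pattern)
--     return result_pattern
--
-- def find_pattern_from_list(input_list, results, pos=0, previous_val='unset', ones=0, zeros=0):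
--     """ Estrapolazione di una porzione di pattern per ciascuna riga/lista di input
--     Esempio:
--      lista      [1, 1, 1, 0, 1, 0, 0]
--      pattern    [0, 3, 1, 1]
--     N.B. Il pattern parte sempre dalla conta degli zero iniziali e ignora gli zero finali"""
--     # INSERIMENTO VALORE PRECEDENTE
--     # Se c'è stata una precedente iterazione E l'elemento attuale è diverso dal valore precedente...
--     if previous_val != 'unset' and input_list[pos] != previous_val:
--         # Se il valore precedente era 1, lo inserisco nei risultati
--         if previous_val == 1:
--             # Il primo valore nella sublist rappresenta sempre il numero di zero iniziali (anche se nullo)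
--             if not results:
--                 results.append(0)
--             results.append(ones)
--             ones = 0
--         # Se il valore precedente era 0, lo inserisco nei risultati
--         else:
--             results.append(zeros)
--             zeros = 0
--
--     # ANALISI VALORE CORRENTE
--     if input_list[pos] == 1:
--         # Se è l'ultimo della lista, lo inserisco e restituisco i risultati
--         if pos + 1 == len(input_list):
--             if not results:
--                 results.append(0)
--             results.append(ones + 1)
--             return results
--         # Aumento la conta degli uno
--         return find_pattern_from_list(input_list, results, pos + 1, input_list[pos], ones=ones + 1, zeros=0)
--     else:
--         # Sè è l'ultimo numero (zero) della lista, restituisco i risultati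
--         if pos + 1 == len(input_list):
--             if not results:
--                 results.append(len(input_list))
--             return results
--         # Aumento la conta degli zero
--         return find_pattern_from_list(input_list, results, pos + 1, input_list[pos], ones=0, zeros=zeros + 1)
-- ===== SOURCE B (Python) =====
-- def _groups(row):
--     """Consecutive (value, run_length) groups of row, built by slicing off the first run."""
--     if not row:
--         return []
--     v = row[0]
--     i = 1
--     while i < len(row) and row[i] == v:
--         i += 1
--     return [(v, i)] + _groups(row[i:])
--
-- def find_pattern_from_input_matrix(input_matrix):
--     """ Estrapolazione di un pattern dall'input dell'utente """
--     result_pattern = []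
--     for row in input_matrix:
--         groups = _groups(row)
--         v0, n0 = groups[0]          # empty row -> IndexError, as in the original
--         tail = groups[1:]
--         if tail and tail[-1][0] != 1:
--             tail = tail[:-1]        # trailing non-1 run is dropped
--         row_pattern = ([0, n0] if v0 == 1 else [n0]) + [n for _, n in tail]
--         if result_pattern or len(row_pattern) != 1:
--             result_pattern.append(row_pattern)
--     return result_pattern
-- ===== Notes on version B (the rewrite author's own statement) =====
-- stated objective: simpler
-- what changed: B replaces A's per-element recursion carrying pos/previous_val/ones/zeros counters by a two-phase decomposition: first build the consecutive (value, run_length) groups of each row, then form the pattern directly from the group list (leading slot from the first group, trailing non-1 group dropped).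
import Mathlib
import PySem

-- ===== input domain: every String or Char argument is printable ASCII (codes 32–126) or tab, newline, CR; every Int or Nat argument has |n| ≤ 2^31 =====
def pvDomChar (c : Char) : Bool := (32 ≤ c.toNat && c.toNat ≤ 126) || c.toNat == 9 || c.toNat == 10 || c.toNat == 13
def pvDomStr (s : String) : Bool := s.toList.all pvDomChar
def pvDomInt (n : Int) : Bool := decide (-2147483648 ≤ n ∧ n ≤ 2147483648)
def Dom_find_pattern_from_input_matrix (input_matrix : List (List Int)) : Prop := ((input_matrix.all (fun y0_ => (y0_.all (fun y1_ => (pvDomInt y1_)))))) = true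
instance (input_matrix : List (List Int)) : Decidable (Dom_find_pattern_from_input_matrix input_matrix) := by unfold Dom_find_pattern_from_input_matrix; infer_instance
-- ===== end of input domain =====

-- B replaces A's per-element recursion (pos/previous_val/ones/zeros counters) by a two-phase
-- decomposition: build the (value, run_length) groups of each row, then read the pattern off the
-- group list. Objective: simpler. Equivalence of RETURN values is proved on matrices without empty rows.

-- ===== PORT A =====
-- Literal port of find_pattern_from_list; 'unset' previous_val is `none`, the recursion is
-- guarded by fuel (= remaining positions; Python recurses exactly len-1 times, so fuel = len
-- at the top call never runs out) and input_list[pos] uses pyGet? (none = IndexError, the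
-- empty-row case excluded by Pre_).
def find_pattern_from_list (fuel : Nat) (input_list : List Int) (results : List Int)
    (pos : Nat) (previous_val : Option Int) (ones zeros : Int) : List Int :=
  match fuel with
  | 0 => results  -- fuel guard, never reached from the top-level call
  | fuel + 1 =>
    match PySem.List.pyGet? input_list (pos : Int) with
    | none => results  -- IndexError (empty row); excluded by Pre_
    | some cur =>
      -- INSERIMENTO VALORE PRECEDENTE
      match
        (match previous_val with
         | some pv =>
           if cur ≠ pv then
             if pv = 1 then
               ((if results = [] then results ++ [0] else results) ++ [ones], (0 : Int), zeros)
             else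
               (results ++ [zeros], ones, (0 : Int))
           else (results, ones, zeros)
         | none => (results, ones, zeros)) with
      | (results, ones, zeros) =>
        -- ANALISI VALORE CORRENTE
        if cur = 1 then
          if pos + 1 = input_list.length then
            (if results = [] then results ++ [0] else results) ++ [ones + 1]
          else
            find_pattern_from_list fuel input_list results (pos + 1) (some cur) (ones + 1) 0
        else
          if pos + 1 = input_list.length then
            (if results = [] then results ++ [(input_list.length : Int)] else results)
          else
            find_pattern_from_list fuel input_list results (pos + 1) (some cur) 0 (zeros + 1)

def find_pattern_from_input_matrix (input_matrix : List (List Int)) : List (List Int) :=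
  input_matrix.foldl
    (fun result_pattern row =>
      let row_pattern := find_pattern_from_list row.length row [] 0 none 0 0
      if result_pattern ≠ [] ∨ row_pattern.length ≠ 1 then result_pattern ++ [row_pattern]
      else result_pattern)
    []

-- ===== PORT B =====
-- _groups of Source B: first run peeled by the while loop (i = 1 + length of the matching prefix
-- of the rest), then recursion on the remaining slice.
def pyGroups : List Int → List (Int × Int)
  | [] => []
  | v :: rest =>
    (v, 1 + ((rest.takeWhile (fun x => x = v)).length : Int))
      :: pyGroups (rest.dropWhile (fun x => x = v))
termination_by l => l.length
decreasing_by simpa using Nat.lt_succ_of_le (List.length_dropWhile_le _ _)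

-- row_pattern computation of Source B's loop body (empty row: Python raises IndexError at
-- groups[0]; excluded by Pre_, the [] arm is a totality guard)
def altRow (row : List Int) : List Int :=
  match pyGroups row with
  | [] => []
  | (v0, n0) :: tail0 =>
    let tail :=
      match tail0.getLast? with
      | some (vl, _) => if vl ≠ 1 then tail0.dropLast else tail0
      | none => tail0
    (if v0 = 1 then [0, n0] else [n0]) ++ tail.map Prod.snd

def find_pattern_from_input_matrix_alt (input_matrix : List (List Int)) : List (List Int) :=
  input_matrix.foldl
    (fun result_pattern row =>
      let row_pattern := altRow row
      if result_pattern ≠ [] ∨ row_pattern.length ≠ 1 then result_pattern ++ [row_pattern]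
      else result_pattern)
    []

-- ===== PRECONDITION & SPEC =====
-- Pre_ excludes matrices containing an empty row: there A (and B) raise IndexError.
def Pre_find_pattern_from_input_matrix (input_matrix : List (List Int)) : Prop :=
  ∀ row ∈ input_matrix, row ≠ []
instance (input_matrix : List (List Int)) : Decidable (Pre_find_pattern_from_input_matrix input_matrix) := by
  unfold Pre_find_pattern_from_input_matrix; infer_instance

def pvWitness_find_pattern_from_input_matrix : List (List Int) := [[1, 1, 1, 0, 1, 0, 0], [0, 1]]

def Spec_find_pattern_from_input_matrix (input_matrix : List (List Int)) (out : List (List Int)) : Prop := out = find_pattern_from_input_matrix_alt input_matrix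
instance (input_matrix : List (List Int)) (out : List (List Int)) : Decidable (Spec_find_pattern_from_input_matrix input_matrix out) := by unfold Spec_find_pattern_from_input_matrix; infer_instance

-- ===== CLAIM (what is proved, stated in full; the proofs are below) =====
def Claim_equal_find_pattern_from_input_matrix : Prop := ∀ (input_matrix : List (List Int)), Dom_find_pattern_from_input_matrix input_matrix → Pre_find_pattern_from_input_matrix input_matrix → Spec_find_pattern_from_input_matrix input_matrix (find_pattern_from_input_matrix input_matrix)

-- ===== LEMMAS AND PROOFS =====

-- A's recursion re-expressed on the suffix input_list[pos:] (L = len(input_list), needed by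
-- the all-zeros final branch).
def fplL (L : Int) : List Int → List Int → Option Int → Int → Int → List Int
  | [], results, _, _, _ => results
  | cur :: rest, results, previous_val, ones, zeros =>
    match
      (match previous_val with
       | some pv =>
         if cur ≠ pv then
           if pv = 1 then
             ((if results = [] then results ++ [0] else results) ++ [ones], (0 : Int), zeros)
           else
             (results ++ [zeros], ones, (0 : Int))
         else (results, ones, zeros)
       | none => (results, ones, zeros)) with
    | (results, ones, zeros) =>
      if cur = 1 then
        if rest = [] then (if results = [] then results ++ [0] else results) ++ [ones + 1]
        else fplL L rest results (some cur) (ones + 1) 0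
      else
        if rest = [] then (if results = [] then results ++ [L] else results)
        else fplL L rest results (some cur) 0 (zeros + 1)

-- merge a pending run (p, c) into a group list
def pendMerge (p c : Int) : List (Int × Int) → List (Int × Int)
  | [] => [(p, c)]
  | (v, n) :: gs => if v = p then (p, c + n) :: gs else (p, c) :: (v, n) :: gs

-- fold a group list into the pattern, A-style
def emit (L : Int) : List Int → List (Int × Int) → List Int
  | results, [] => results
  | results, [(v, n)] =>
    if v = 1 then (if results = [] then results ++ [0] else results) ++ [n]
    else (if results = [] then results ++ [L] else results)
  | results, (v, n) :: g :: gs =>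
    emit L
      (if v = 1 then (if results = [] then results ++ [0] else results) ++ [n]
       else results ++ [n])
      (g :: gs)

lemma pendMerge_succ (v : Int) (c : Int) (s : List Int) :
    pendMerge v (c + 1) (pyGroups s) = pendMerge v c (pyGroups (v :: s)) := by
  cases s with
  | nil => simp [pyGroups, pendMerge]
  | cons w s' =>
    by_cases hw : w = v
    · subst hw
      simp only [pyGroups, pendMerge]
      simp [List.takeWhile, List.dropWhile, pendMerge]; ring
    · simp [pyGroups, pendMerge, hw]

lemma pyGroups_cons (v : Int) (rest : List Int) :
    pyGroups (v :: rest)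
      = (v, 1 + ((rest.takeWhile (fun x => x = v)).length : Int))
          :: pyGroups (rest.dropWhile (fun x => x = v)) := by
  simp [pyGroups]

lemma pendMerge_one (v : Int) (s : List Int) :
    pendMerge v 1 (pyGroups s) = pyGroups (v :: s) := by
  rw [show (1:Int) = 0 + 1 by ring, pendMerge_succ, pyGroups_cons, pendMerge]
  simp

lemma emit_step (L : Int) (results : List Int) (v n : Int) (g : Int × Int) (gs : List (Int × Int)) :
    emit L results ((v, n) :: g :: gs)
      = emit L (if v = 1 then (if results = [] then results ++ [0] else results) ++ [n]
                else results ++ [n]) (g :: gs) := by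
  rfl

lemma fplL_some : ∀ (s : List Int), s ≠ [] → ∀ (L : Int) (results : List Int) (p c : Int),
    fplL L s results (some p) (if p = 1 then c else 0) (if p = 1 then 0 else c)
      = emit L results (pendMerge p c (pyGroups s)) := by
  intro s
  induction s with
  | nil => intro h; exact absurd rfl h
  | cons cur rest ih =>
    intro _ L results p c
    by_cases hcp : cur = p
    · -- no flush: the pending (p, c) run absorbs cur
      subst hcp
      rw [← pendMerge_succ]
      cases hr : rest with
      | nil =>
        by_cases h1 : cur = 1 <;>
          simp [fplL, pyGroups, pendMerge, emit, h1] <;> ring_nf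
      | cons a as =>
        rw [← hr]
        have hne : rest ≠ [] := by simp [hr]
        have IH := ih hne L results cur (c + 1)
        by_cases h1 : cur = 1
        · simp only [h1, if_pos rfl] at IH ⊢
          simpa [fplL, hne, show c + 1 + 0 = c + 1 by ring] using
            (by simpa [h1] using IH : fplL L rest results (some 1) (c + 1) 0
              = emit L results (pendMerge 1 (c + 1) (pyGroups rest)))
        · simp only [h1, if_neg h1] at IH ⊢
          simpa [fplL, hne, h1] using IH
    · -- flush the pending (p, c) run, then start a fresh run of cur
      have hgr : pendMerge p c (pyGroups (cur :: rest))
          = (p, c) :: pyGroups (cur :: rest) := by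
        rw [pyGroups_cons]; simp [pendMerge, hcp]
      cases hr : rest with
      | nil =>
        by_cases hp1 : p = 1
        · by_cases h1 : cur = 1
          · exact absurd (h1.trans hp1.symm) hcp
          · simp [fplL, pyGroups, pendMerge, emit, hp1, h1, hcp] <;> ring_nf
        · by_cases h1 : cur = 1
          · have hcp' : ¬(1 : Int) = p := h1 ▸ hcp
            simp [fplL, pyGroups, pendMerge, emit, hp1, h1, hcp, hcp'] <;> ring_nf
          · simp [fplL, pyGroups, pendMerge, emit, hp1, h1, hcp] <;> ring_nf
      | cons a as =>
        rw [← hr]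
        have hne : rest ≠ [] := by simp [hr]
        rw [hgr, pyGroups_cons, emit_step, ← pyGroups_cons, ← pendMerge_one cur rest]
        by_cases hp1 : p = 1
        · have IH := ih hne L ((if results = [] then results ++ [0] else results) ++ [c]) cur 1
          by_cases h1 : cur = 1
          · exact absurd (h1.trans hp1.symm) hcp
          · simp only [if_neg h1] at IH
            simp [fplL, hne, hcp, hp1, h1]
            simpa using IH
        · have IH := ih hne L (results ++ [c]) cur 1
          by_cases h1 : cur = 1
          · have hcp' : ¬(1 : Int) = p := h1 ▸ hcp
            simp only [h1] at IH
            simp [fplL, hne, hcp, hcp', hp1, h1]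
            simpa using IH
          · simp only [if_neg h1] at IH
            simp [fplL, hne, hcp, hp1, h1]
            simpa using IH

lemma fplL_none (L : Int) (s : List Int) (hs : s ≠ []) (results : List Int) :
    fplL L s results none 0 0 = emit L results (pyGroups s) := by
  cases s with
  | nil => exact absurd rfl hs
  | cons cur rest =>
    cases hr : rest with
    | nil =>
      by_cases h1 : cur = 1 <;> simp [fplL, pyGroups, emit, h1]
    | cons a as =>
      rw [← hr]
      have hne : rest ≠ [] := by simp [hr]
      rw [← pendMerge_one cur rest]
      have IH := fplL_some rest hne L results cur 1
      by_cases h1 : cur = 1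
      · simp only [h1, if_pos rfl] at IH
        simp [fplL, hne, h1]
        simpa [h1] using IH
      · simp only [if_neg h1] at IH
        simp [fplL, hne, h1]
        simpa using IH

lemma fpl_eq_fplL : ∀ (fuel : Nat) (l : List Int) (results : List Int) (pos : Nat)
    (prev : Option Int) (ones zeros : Int), l.length ≤ fuel + pos →
    find_pattern_from_list fuel l results pos prev ones zeros
      = fplL (l.length : Int) (l.drop pos) results prev ones zeros := by
  intro fuel
  induction fuel with
  | zero =>
    intro l results pos prev ones zeros h
    rw [List.drop_eq_nil_iff.mpr (by omega)]
    rfl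
  | succ fuel ih =>
    intro l results pos prev ones zeros h
    by_cases hpos : pos < l.length
    · have hget : PySem.List.pyGet? l (pos : Int) = some l[pos] := by
        simp [PySem.List.pyGet?_natCast, List.getElem?_eq_getElem hpos]
      have hdrop : l.drop pos = l[pos] :: l.drop (pos + 1) :=
        List.drop_eq_getElem_cons hpos
      have hlast : (pos + 1 = l.length) ↔ (l.drop (pos + 1) = []) := by
        rw [List.drop_eq_nil_iff]; omega
      rw [hdrop]
      simp only [find_pattern_from_list, hget, fplL]
      by_cases hl : pos + 1 = l.length
      · have hl' : l.drop (pos + 1) = [] := hlast.mp hl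
        by_cases h1 : l[pos] = 1 <;> simp [h1, hl, hl']
      · have hl' : ¬(l.drop (pos + 1) = []) := fun hh => hl (hlast.mpr hh)
        by_cases h1 : l[pos] = 1 <;>
          simp only [h1, hl, hl', if_false, if_true, ite_false, ite_true, reduceIte] <;>
          exact ih l _ (pos + 1) _ _ _ (by omega)
    · have hnone : l[(pos : Nat)]? = none := List.getElem?_eq_none_iff.mpr (by omega)
      have hget : PySem.List.pyGet? l (pos : Int) = none := by
        simp [PySem.List.pyGet?_natCast, hnone]
      rw [List.drop_eq_nil_iff.mpr (by omega)]
      simp [find_pattern_from_list, hget, fplL]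

lemma emit_nonempty : ∀ (gs : List (Int × Int)) (L : Int) (results : List Int), results ≠ [] →
    emit L results gs
      = results ++ (match gs.getLast? with
                    | some (vl, _) => if vl ≠ 1 then gs.dropLast else gs
                    | none => gs).map Prod.snd := by
  intro gs
  induction gs with
  | nil => intro L results h; simp [emit]
  | cons g gs ih =>
    intro L results h
    obtain ⟨v, n⟩ := g
    cases gs with
    | nil =>
      by_cases hv : v = 1 <;> simp [emit, hv, h]
    | cons g' gs' =>
      have h2 : results ++ [n] ≠ [] := by simp
      have step : emit L results ((v, n) :: g' :: gs') = emit L (results ++ [n]) (g' :: gs') := by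
        by_cases hv : v = 1 <;> simp [emit, hv, h]
      rw [step, ih L (results ++ [n]) h2]
      match hl : (g' :: gs').getLast? with
      | some (vl, m) =>
        by_cases h1 : vl = 1 <;> simp [hl, h1, List.dropLast]
      | none => simp at hl

lemma pyGroups_ne_nil (v : Int) (rest : List Int) : pyGroups (v :: rest) ≠ [] := by
  rw [pyGroups_cons]; simp

lemma pyGroups_eq_nil_iff (s : List Int) : pyGroups s = [] ↔ s = [] := by
  cases s with
  | nil => simp [pyGroups]
  | cons v rest => simp [pyGroups]

lemma pyGroups_singleton_len (row : List Int) (v n : Int)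
    (h : pyGroups row = [(v, n)]) : n = (row.length : Int) := by
  cases row with
  | nil => simp [pyGroups] at h
  | cons w rest =>
    rw [pyGroups_cons] at h
    have hdw : rest.dropWhile (fun x => x = w) = [] := by
      have := (List.cons_eq_cons.mp h).2
      cases hdd : rest.dropWhile (fun x => x = w) with
      | nil => rfl
      | cons a as => rw [hdd] at this; exact absurd this (pyGroups_ne_nil a as)
    have htw : rest.takeWhile (fun x => x = w) = rest := by
      have := List.takeWhile_append_dropWhile (p := fun x => decide (x = w)) (l := rest)
      rw [hdw, List.append_nil] at this
      exact this
    have hn := congrArg Prod.snd (List.cons_eq_cons.mp h).1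
    rw [htw] at hn
    simp only [List.length_cons] at *
    omega

lemma row_eq (row : List Int) (hrow : row ≠ []) :
    find_pattern_from_list row.length row [] 0 none 0 0 = altRow row := by
  rw [fpl_eq_fplL row.length row [] 0 none 0 0 (by omega)]
  rw [List.drop_zero, fplL_none _ _ hrow]
  unfold altRow
  match hg : pyGroups row with
  | [] => exact absurd ((pyGroups_eq_nil_iff row).mp hg) hrow
  | [(v0, n0)] =>
    have hn := pyGroups_singleton_len row v0 n0 hg
    by_cases h1 : v0 = 1 <;> simp [emit, h1, hn]
  | (v0, n0) :: g :: gs =>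
    rw [emit_step]
    have hres : (if v0 = 1 then (if ([] : List Int) = [] then ([] : List Int) ++ [0] else []) ++ [n0] else ([] : List Int) ++ [n0])
        = (if v0 = 1 then [0, n0] else [n0]) := by
      by_cases h1 : v0 = 1 <;> simp [h1]
    rw [hres, emit_nonempty (g :: gs) _ _ (by by_cases h1 : v0 = 1 <;> simp [h1])]


lemma fold_eq : ∀ (m : List (List Int)) (acc : List (List Int)), (∀ row ∈ m, row ≠ []) →
    m.foldl
      (fun result_pattern row =>
        let row_pattern := find_pattern_from_list row.length row [] 0 none 0 0
        if result_pattern ≠ [] ∨ row_pattern.length ≠ 1 then result_pattern ++ [row_pattern]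
        else result_pattern) acc
    = m.foldl
      (fun result_pattern row =>
        let row_pattern := altRow row
        if result_pattern ≠ [] ∨ row_pattern.length ≠ 1 then result_pattern ++ [row_pattern]
        else result_pattern) acc := by
  intro m
  induction m with
  | nil => intro acc _; rfl
  | cons row m ih =>
    intro acc hpre
    simp only [List.foldl_cons]
    rw [show find_pattern_from_list row.length row [] 0 none 0 0 = altRow row from
          row_eq row (hpre row (List.mem_cons_self ..))]
    exact ih _ (fun r hr => hpre r (List.mem_cons_of_mem _ hr))

-- ===== VERDICT (by name: the statement is the Claim_ definition above) =====
theorem find_pattern_from_input_matrix_spec : Claim_equal_find_pattern_from_input_matrix := by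
  intro m _ hpre
  unfold Spec_find_pattern_from_input_matrix
  unfold find_pattern_from_input_matrix find_pattern_from_input_matrix_alt
  exact fold_eq m [] hpre
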